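-- pv_equiv track=rewrite | github.com/ninnroot/aoc2023 | day3/main.py | is_touching
-- ===== SOURCE A (Python) =====
-- def get_surroundings(x, y):
--     return [
--         (x-1, y),
--         (x-1, y-1),
--         (x-1, y+1),
--         (x+1, y),
--         (x+1, y-1),
--         (x+1, y+1),
--         (x, y+1),
--         (x, y-1),
--     ]
--
-- def is_touching(start, end, self):
--     surroundings = get_surroundings(self[0], self[1])
--     touching = False
--     if start in surroundings or end in surroundings:
--         touching = True
--         return touching
--     body = []
--     for i in range(start[0], end[0]):
--         body.append((i, start[1]))
--     for i in surroundings: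
--         if i in body:
--             touching = True
--             return touching
--     return touching
-- ===== SOURCE B (Python) =====
-- def is_touching(start, end, self):
--     x, y = self
--     def near(p):
--         return abs(p[0] - x) <= 1 and abs(p[1] - y) <= 1 and p != (x, y)
--     if near(start) or near(end):
--         return True
--     sx, sy = start
--     ex = end[0]
--     if abs(sy - y) > 1:
--         return False
--     return (sx <= x - 1 < ex) or (sx <= x + 1 < ex) or (sy != y and sx <= x < ex)
-- ===== Notes on version B (the rewrite author's own statement) =====
-- stated objective: faster
-- what changed: Replaces A's construction of an 8-neighbor list plus a body list of every cell of the number (checked by linear list membership) with O(1) interval/absolute-value arithmetic on the coordinates.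
import Mathlib
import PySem

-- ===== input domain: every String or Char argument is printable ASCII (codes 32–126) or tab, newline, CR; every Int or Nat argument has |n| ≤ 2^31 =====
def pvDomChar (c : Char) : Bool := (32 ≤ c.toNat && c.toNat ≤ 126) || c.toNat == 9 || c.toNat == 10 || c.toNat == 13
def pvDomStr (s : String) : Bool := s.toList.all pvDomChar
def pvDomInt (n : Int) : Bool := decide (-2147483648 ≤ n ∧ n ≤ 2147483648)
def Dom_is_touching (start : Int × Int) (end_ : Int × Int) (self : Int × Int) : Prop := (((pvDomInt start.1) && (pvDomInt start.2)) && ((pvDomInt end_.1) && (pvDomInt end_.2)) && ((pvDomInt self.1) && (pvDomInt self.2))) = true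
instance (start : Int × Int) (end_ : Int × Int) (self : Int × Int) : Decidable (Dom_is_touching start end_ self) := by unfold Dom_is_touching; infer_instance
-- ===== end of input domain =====

-- B replaces A's list building (8-neighbor list plus a body list of the number's cells,
-- checked by linear membership) with O(1) interval arithmetic; same results everywhere.

-- ===== PORT A =====
def get_surroundings (x y : Int) : List (Int × Int) :=
  [(x-1, y), (x-1, y-1), (x-1, y+1), (x+1, y), (x+1, y-1), (x+1, y+1), (x, y+1), (x, y-1)]

def is_touching (start : Int × Int) (end_ : Int × Int) (self : Int × Int) : Bool :=
  let surroundings := get_surroundings self.1 self.2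
  -- if start in surroundings or end in surroundings: return True
  if surroundings.contains start || surroundings.contains end_ then
    true
  else
    -- body = [(i, start[1]) for i in range(start[0], end[0])]
    let body := (PySem.List.pyRange start.1 end_.1 1).foldl
      (fun acc i => acc ++ [(i, start.2)]) []
    -- for i in surroundings: if i in body: return True ; return False
    surroundings.any (fun i => body.contains i)

-- ===== PORT B =====
def pvNear (p : Int × Int) (x y : Int) : Bool :=
  (p.1 - x).natAbs ≤ 1 && (p.2 - y).natAbs ≤ 1 && !(p == (x, y))

def is_touching_alt (start : Int × Int) (end_ : Int × Int) (self : Int × Int) : Bool :=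
  let x := self.1
  let y := self.2
  if pvNear start x y || pvNear end_ x y then
    true
  else
    let sx := start.1
    let sy := start.2
    let ex := end_.1
    if (sy - y).natAbs > 1 then
      false
    else
      (decide (sx ≤ x - 1) && decide (x - 1 < ex)) ||
      (decide (sx ≤ x + 1) && decide (x + 1 < ex)) ||
      (!(sy == y) && decide (sx ≤ x) && decide (x < ex))

-- ===== PRECONDITION & SPEC =====
def Spec_is_touching (start : Int × Int) (end_ : Int × Int) (self : Int × Int) (out : Bool) : Prop := out = is_touching_alt start end_ self
instance (start : Int × Int) (end_ : Int × Int) (self : Int × Int) (out : Bool) : Decidable (Spec_is_touching start end_ self out) := by unfold Spec_is_touching; infer_instance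

-- ===== CLAIM (what is proved, stated in full; the proofs are below) =====
def Claim_equal_is_touching : Prop := ∀ (start : Int × Int) (end_ : Int × Int) (self : Int × Int), Dom_is_touching start end_ self → Spec_is_touching start end_ self (is_touching start end_ self)

-- ===== LEMMAS AND PROOFS =====

-- the body list built by A's first loop contains exactly the cells (i, sy) with sx ≤ i < ex
theorem body_mem (sx sy ex : Int) (p : Int × Int) :
    ((PySem.List.pyRange sx ex 1).foldl (fun acc i => acc ++ [(i, sy)]) []).contains p
      = (decide (sx ≤ p.1) && decide (p.1 < ex) && decide (p.2 = sy)) := by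
  have h : ∀ (l : List Int) (acc : List (Int × Int)),
      (l.foldl (fun acc i => acc ++ [(i, sy)]) acc)
        = acc ++ l.map (fun i => (i, sy)) := by
    intro l
    induction l with
    | nil => simp
    | cons a t ih => intro acc; simp [List.foldl, ih]
  rw [h]
  rcases p with ⟨a, b⟩
  rw [Bool.eq_iff_iff]
  simp only [List.nil_append, List.contains_iff_mem, List.mem_map,
    PySem.List.mem_pyRange_one, Prod.mk.injEq, Bool.and_eq_true, decide_eq_true_eq]
  constructor
  · rintro ⟨i, ⟨h1, h2⟩, rfl, rfl⟩; exact ⟨⟨h1, h2⟩, rfl⟩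
  · rintro ⟨⟨h1, h2⟩, rfl⟩; exact ⟨a, ⟨h1, h2⟩, rfl, rfl⟩

-- membership in A's 8-neighbor list is B's near test
theorem mem_surr (px py x y : Int) :
    (([(x-1, y), (x-1, y-1), (x-1, y+1), (x+1, y), (x+1, y-1), (x+1, y+1), (x, y+1), (x, y-1)] : List (Int × Int)).contains (px, py))
      = ((px - x).natAbs ≤ 1 && (py - y).natAbs ≤ 1 && !((px, py) == (x, y))) := by
  rw [Bool.eq_iff_iff]
  simp only [List.contains_iff_mem, List.mem_cons, List.not_mem_nil, or_false,
    Prod.mk.injEq, Bool.and_eq_true, Bool.not_eq_eq_eq_not, Bool.not_true,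
    beq_eq_false_iff_ne, ne_eq, decide_eq_true_eq, not_and]
  omega

-- ===== VERDICT (by name: the statement is the Claim_ definition above) =====
set_option maxHeartbeats 1000000 in
theorem is_touching_spec : Claim_equal_is_touching := by
  intro start end_ self _
  unfold Spec_is_touching is_touching is_touching_alt get_surroundings pvNear
  rcases start with ⟨sx, sy⟩
  rcases end_ with ⟨ex, ey⟩
  rcases self with ⟨x, y⟩
  dsimp only
  rw [mem_surr sx sy x y, mem_surr ex ey x y]
  by_cases hb : (((sx - x).natAbs ≤ 1 && (sy - y).natAbs ≤ 1 && !((sx, sy) == (x, y))) ||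
      ((ex - x).natAbs ≤ 1 && (ey - y).natAbs ≤ 1 && !((ex, ey) == (x, y)))) = true
  · rw [if_pos hb, if_pos hb]
  · rw [if_neg hb, if_neg hb]
    simp only [Bool.or_eq_true, Bool.and_eq_true, Bool.not_eq_eq_eq_not, Bool.not_true,
      beq_eq_false_iff_ne, ne_eq, Prod.mk.injEq, not_or, not_and, decide_eq_true_eq] at hb
    by_cases hy : ((sy - y).natAbs > 1)
    · rw [if_pos hy]
      rw [Bool.eq_iff_iff]
      simp only [List.any_cons, List.any_nil, body_mem, Bool.or_false, Bool.or_eq_true,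
        Bool.and_eq_true, decide_eq_true_eq, Bool.false_eq_true, iff_false, not_or, not_and]
      omega
    · rw [if_neg hy]
      rw [Bool.eq_iff_iff]
      simp only [List.any_cons, List.any_nil, body_mem, Bool.or_false, Bool.or_eq_true,
        Bool.and_eq_true, decide_eq_true_eq, Bool.not_eq_eq_eq_not, Bool.not_true,
        beq_eq_false_iff_ne, ne_eq]
      omega
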